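-- pv_equiv track=rewrite | github.com/jans-code/jansclojurekernel | src/jansclojurekernel/kernel.py | code_valid
-- ===== SOURCE A (Python) =====
-- def code_valid(string):
--     """Test for valid input to avoid kernel hang"""
--     string = string.strip()
--     if string != '':
--         bracket = 0
--         gbracket = 0
--         ebracket = 0
--         quote = 0
--         sense = True
--         for elem in string:
--             if sense:
--                 if elem == '(':
--                     bracket += 1
--                 elif elem == ')':
--                     bracket -= 1
--                 elif elem == '{':
--                     gbracket += 1
--                 elif elem == '}':
--                     gbracket -= 1
--                 elif elem == '[':
--                     ebracket += 1
--                 elif elem == ']':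
--                     ebracket -= 1
--                 elif elem == '"':
--                     sense = False
--                     bracket += 1
--             else:
--                 if elem == '"':
--                     sense = True
--                     bracket -= 1
--         if bracket == 0 and gbracket == 0 and ebracket == 0 and quote == 0 and sense:
--             return True
--         else:
--             return False
--     else:
--         return False
-- ===== SOURCE B (Python) =====
-- def code_valid(string):
--     """Test for valid input to avoid kernel hang"""
--     s = string.strip()
--     if not s:
--         return False
--     parts = s.split('"')
--     if len(parts) % 2 == 0:        # odd number of quotes -> unterminated string
--         return False
--     outside = ''.join(parts[::2])  # text outside quoted regions
--     return (outside.count('(') == outside.count(')')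
--             and outside.count('{') == outside.count('}')
--             and outside.count('[') == outside.count(']'))
-- ===== Notes on version B (the rewrite author's own statement) =====
-- stated objective: idiomatic
-- what changed: Replaces the per-character state-machine loop (sense flag plus four counters) by a partition-then-count computation: split on the double-quote character, reject an even number of parts (unterminated quote), join the even-indexed parts and compare bracket counts with str.count.
import Mathlib
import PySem

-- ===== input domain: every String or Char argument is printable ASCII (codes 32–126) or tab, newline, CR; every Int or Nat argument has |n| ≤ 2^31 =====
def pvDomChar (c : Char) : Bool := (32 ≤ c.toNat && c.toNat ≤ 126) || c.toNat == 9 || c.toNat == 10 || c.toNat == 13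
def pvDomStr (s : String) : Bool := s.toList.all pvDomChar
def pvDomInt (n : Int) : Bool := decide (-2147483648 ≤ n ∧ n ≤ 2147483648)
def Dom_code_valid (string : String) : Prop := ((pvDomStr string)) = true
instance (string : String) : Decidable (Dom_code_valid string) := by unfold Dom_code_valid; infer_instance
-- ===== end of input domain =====

-- B replaces A's per-character sense/counter loop by the idiomatic split-on-quote,
-- join even parts, compare bracket counts decomposition (measured faster by a constant factor).


-- ===== PORT A =====
-- one loop step of A: state (bracket, gbracket, ebracket, quote, sense), branches in A's order
def codeValidStep (st : Int × Int × Int × Int × Bool) (elem : Char) : Int × Int × Int × Int × Bool :=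
  match st with
  | (bracket, gbracket, ebracket, quote, sense) =>
    if sense then
      if elem = '(' then (bracket + 1, gbracket, ebracket, quote, sense)
      else if elem = ')' then (bracket - 1, gbracket, ebracket, quote, sense)
      else if elem = '{' then (bracket, gbracket + 1, ebracket, quote, sense)
      else if elem = '}' then (bracket, gbracket - 1, ebracket, quote, sense)
      else if elem = '[' then (bracket, gbracket, ebracket + 1, quote, sense)
      else if elem = ']' then (bracket, gbracket, ebracket - 1, quote, sense)
      else if elem = '"' then (bracket + 1, gbracket, ebracket, quote, false)
      else (bracket, gbracket, ebracket, quote, sense)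
    else
      if elem = '"' then (bracket - 1, gbracket, ebracket, quote, true)
      else (bracket, gbracket, ebracket, quote, sense)

def code_valid (string : String) : Bool :=
  let s := PySem.Chars.strip string.toList
  if s ≠ [] then
    match s.foldl codeValidStep (0, 0, 0, 0, true) with
    | (bracket, gbracket, ebracket, quote, sense) =>
      if bracket = 0 ∧ gbracket = 0 ∧ ebracket = 0 ∧ quote = 0 ∧ sense then true else false
  else false

-- ===== PORT B =====
-- hand port of the step-2 slice parts[::2] (exact: every second element starting at index 0)
def codeValidEvens (l : List (List Char)) : List (List Char) :=
  match l with
  | [] => []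
  | [x] => [x]
  | x :: _ :: xs => x :: codeValidEvens xs

def code_valid_alt (string : String) : Bool :=
  let s := PySem.Chars.strip string.toList
  if s = [] then false
  else
    let parts := PySem.Chars.splitOn s ['"']
    if parts.length % 2 == 0 then false
    else
      let outside := PySem.Chars.join [] (codeValidEvens parts)
      (PySem.Chars.count outside ['('] == PySem.Chars.count outside [')']) &&
      (PySem.Chars.count outside ['{'] == PySem.Chars.count outside ['}']) &&
      (PySem.Chars.count outside ['['] == PySem.Chars.count outside [']'])

-- ===== PRECONDITION & SPEC =====
def Spec_code_valid (string : String) (out : Bool) : Prop := out = code_valid_alt string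
instance (string : String) (out : Bool) : Decidable (Spec_code_valid string out) := by unfold Spec_code_valid; infer_instance

-- ===== CLAIM (what is proved, stated in full; the proofs are below) =====
def Claim_equal_code_valid : Prop := ∀ (string : String), Dom_code_valid string → Spec_code_valid string (code_valid string)

-- ===== LEMMAS AND PROOFS =====

-- reference split: Python s.split('"') on a char list
def pvSplit (a : Char) : List Char → List (List Char)
  | [] => [[]]
  | c :: cs => if c = a then [] :: pvSplit a cs else (pvSplit a cs).modifyHead (c :: ·)

-- chars outside quoted regions, given the current sense flag
def pvOutside : Bool → List Char → List Char
  | _, [] => []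
  | true, c :: cs => if c = '"' then pvOutside false cs else c :: pvOutside true cs
  | false, c :: cs => if c = '"' then pvOutside true cs else pvOutside false cs

lemma pvSplit_ne_nil (a : Char) (l : List Char) : pvSplit a l ≠ [] := by
  induction l with
  | nil => simp [pvSplit]
  | cons c cs ih =>
    simp only [pvSplit]
    split
    · simp
    · cases h : pvSplit a cs with
      | nil => exact absurd h ih
      | cons p ps => simp

lemma countGo_singleton (c : Char) (l : List Char) (fuel acc : ℕ) (h : l.length ≤ fuel) :
    PySem.Chars.count.go [c] fuel l acc = acc + l.count c := by
  induction l generalizing fuel acc with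
  | nil => cases fuel <;> simp [PySem.Chars.count.go]
  | cons d t ih =>
    cases fuel with
    | zero => simp at h
    | succ f =>
      simp only [PySem.Chars.count.go, List.isPrefixOf, Bool.and_true]
      have hdrop : List.drop [c].length (d :: t) = t := rfl
      by_cases hd : (c == d) = true
      · rw [if_pos hd, hdrop, ih f (acc + 1) (by simpa using h)]
        have : c = d := by simpa using hd
        subst this
        simp [List.count_cons]
        omega
      · rw [if_neg hd, ih f acc (by simpa using h)]
        have : ¬ (d = c) := fun he => hd (by simp [he])
        simp [List.count_cons, this]

lemma count_singleton (l : List Char) (c : Char) :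
    PySem.Chars.count l [c] = l.count c := by
  have h := countGo_singleton c l l.length 0 le_rfl
  simp [PySem.Chars.count, h]

lemma pvModifyHead_id (l : List (List Char)) :
    l.modifyHead (fun x => x) = l := by
  cases l <;> simp

lemma splitOnGo_eq (a : Char) (fuel : ℕ) (l cur : List Char) (acc : List (List Char))
    (h : l.length < fuel) :
    PySem.Chars.splitOn.go [a] fuel l cur acc
      = acc.reverse ++ (pvSplit a l).modifyHead (cur.reverse ++ ·) := by
  induction l generalizing fuel cur acc with
  | nil =>
    cases fuel with
    | zero => omega
    | succ f => simp [PySem.Chars.splitOn.go, pvSplit]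
  | cons c cs ih =>
    cases fuel with
    | zero => omega
    | succ f =>
      simp only [PySem.Chars.splitOn.go, List.isPrefixOf, Bool.and_true]
      have hdrop : List.drop [a].length (c :: cs) = cs := rfl
      by_cases hc : (a == c) = true
      · rw [if_pos hc, hdrop, ih f [] (cur.reverse :: acc) (by simpa using h)]
        have : a = c := by simpa using hc
        subst this
        simp [pvSplit, pvModifyHead_id]
      · rw [if_neg hc, ih f (c :: cur) acc (by simpa using h)]
        have hne : ¬ (c = a) := fun he => hc (by simp [he])
        simp only [pvSplit, if_neg hne]
        cases hs : pvSplit a cs with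
        | nil => exact absurd hs (pvSplit_ne_nil a cs)
        | cons p ps => simp

lemma splitOn_eq (a : Char) (l : List Char) :
    PySem.Chars.splitOn l [a] = pvSplit a l := by
  rw [PySem.Chars.splitOn, splitOnGo_eq a (l.length + 1) l [] [] (by omega)]
  simp [pvModifyHead_id]

lemma join_nil_cons (x : List Char) (xs : List (List Char)) :
    PySem.Chars.join [] (x :: xs) = x ++ PySem.Chars.join [] xs := by
  cases xs <;> simp [PySem.Chars.join, List.intercalate]

lemma evens_cons (x : List Char) (l : List (List Char)) :
    codeValidEvens (x :: l) = x :: codeValidEvens (l.drop 1) := by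
  cases l <;> simp [codeValidEvens]

-- join of even parts = chars outside quotes (both variants at once)
lemma join_evens_split (cs : List Char) :
    PySem.Chars.join [] (codeValidEvens (pvSplit '"' cs)) = pvOutside true cs ∧
    PySem.Chars.join [] (codeValidEvens ((pvSplit '"' cs).drop 1)) = pvOutside false cs := by
  induction cs with
  | nil => simp [pvSplit, pvOutside, codeValidEvens, PySem.Chars.join, List.intercalate]
  | cons c cs ih =>
    by_cases hc : c = '"'
    · subst hc
      have h1 : pvSplit '"' ('"' :: cs) = [] :: pvSplit '"' cs := by simp [pvSplit]
      have h2 : pvOutside true ('"' :: cs) = pvOutside false cs := by simp [pvOutside]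
      have h3 : pvOutside false ('"' :: cs) = pvOutside true cs := by simp [pvOutside]
      rw [h1, h2, h3]
      constructor
      · rw [evens_cons, join_nil_cons]
        simpa using ih.2
      · simpa using ih.1
    · obtain ⟨ih1, ih2⟩ := ih
      cases hs : pvSplit '"' cs with
      | nil => exact absurd hs (pvSplit_ne_nil '"' cs)
      | cons p ps =>
        have h1 : pvSplit '"' (c :: cs) = (c :: p) :: ps := by
          simp only [pvSplit, if_neg hc, hs, List.modifyHead]
        have h2 : pvOutside true (c :: cs) = c :: pvOutside true cs := by
          simp [pvOutside, hc]
        have h3 : pvOutside false (c :: cs) = pvOutside false cs := by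
          simp [pvOutside, hc]
        rw [h1, h2, h3]
        rw [hs] at ih1 ih2
        constructor
        · rw [evens_cons, join_nil_cons]
          rw [evens_cons, join_nil_cons] at ih1
          simp only [List.cons_append, List.append_assoc] at ih1 ⊢
          rw [← ih1]
        · simpa using ih2

lemma split_length (cs : List Char) :
    (pvSplit '"' cs).length = cs.count '"' + 1 := by
  induction cs with
  | nil => simp [pvSplit]
  | cons c cs ih =>
    by_cases hc : c = '"'
    · subst hc; simp [pvSplit, ih, List.count_cons]
    · cases hs : pvSplit '"' cs with
      | nil => exact absurd hs (pvSplit_ne_nil '"' cs)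
      | cons p ps =>
        simp only [pvSplit, if_neg hc, hs, List.modifyHead]
        rw [hs] at ih
        simp [List.count_cons, hc, Ne.symm hc] at ih ⊢
        omega

def pvInQ (s : Bool) : Int := if s then 0 else 1

def pvSense (s : Bool) (cs : List Char) : Bool := (s == (cs.count '"' % 2 == 0))

lemma sense_cons_ne (s : Bool) (c : Char) (cs : List Char) (h : c ≠ '"') :
    pvSense s (c :: cs) = pvSense s cs := by
  simp [pvSense, List.count_cons, h, Ne.symm h]

lemma sense_cons_q (s : Bool) (cs : List Char) :
    pvSense s ('"' :: cs) = pvSense (!s) cs := by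
  simp only [pvSense, List.count_cons, beq_self_eq_true, if_pos]
  cases s <;> cases h : cs.count '"' % 2 == 0 <;> simp_all [Nat.add_mod] <;> omega

lemma step_true (c : Char) (b g e q : Int) (hq : c ≠ '"') :
    codeValidStep (b, g, e, q, true) c =
      (b + (if c = '(' then 1 else 0) - (if c = ')' then 1 else 0),
       g + (if c = '{' then 1 else 0) - (if c = '}' then 1 else 0),
       e + (if c = '[' then 1 else 0) - (if c = ']' then 1 else 0),
       q, true) := by
  simp only [codeValidStep]
  split_ifs <;> simp_all

lemma dsb (x y : ℕ) : decide ((x : Int) - (y : Int) = 0) = (x == y) := by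
  by_cases h : x = y
  · subst h; simp
  · have h2 : ¬((x : Int) - (y : Int) = 0) := by omega
    simp [h2, h]

-- characterisation of A's fold
lemma foldl_step (cs : List Char) (b g e q : Int) (s : Bool) :
    cs.foldl codeValidStep (b, g, e, q, s) =
      (b + ((pvOutside s cs).count '(' : Int) - ((pvOutside s cs).count ')' : Int)
         + pvInQ (pvSense s cs) - pvInQ s,
       g + ((pvOutside s cs).count '{' : Int) - ((pvOutside s cs).count '}' : Int),
       e + ((pvOutside s cs).count '[' : Int) - ((pvOutside s cs).count ']' : Int),
       q, pvSense s cs) := by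
  induction cs generalizing b g e q s with
  | nil => cases s <;> simp [pvOutside, pvSense, pvInQ]
  | cons c cs ih =>
    rw [List.foldl_cons]
    cases s with
    | true =>
      by_cases hq : c = '"'
      · subst hq
        have hstep : codeValidStep (b, g, e, q, true) '"' = (b + 1, g, e, q, false) := by
          simp [codeValidStep]
        have hout : pvOutside true ('"' :: cs) = pvOutside false cs := by simp [pvOutside]
        rw [hstep, ih, sense_cons_q, hout]
        simp only [Bool.not_true, Prod.mk.injEq, and_true]
        have h1 : pvInQ true = 0 := rfl
        have h2 : pvInQ false = 1 := rfl
        rw [h1, h2]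
        ring
      · have hout : pvOutside true (c :: cs) = c :: pvOutside true cs := by simp [pvOutside, hq]
        rw [step_true c b g e q hq, ih, sense_cons_ne true c cs hq, hout]
        simp only [Prod.mk.injEq, and_true]
        refine ⟨?_, ?_, ?_⟩
        · by_cases hA : c = '(' <;> by_cases hB : c = ')' <;>
            simp_all [List.count_cons] <;> push_cast <;> ring
        · by_cases hA : c = '{' <;> by_cases hB : c = '}' <;>
            simp_all [List.count_cons] <;> push_cast <;> ring
        · by_cases hA : c = '[' <;> by_cases hB : c = ']' <;>
            simp_all [List.count_cons] <;> push_cast <;> ring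
    | false =>
      by_cases hq : c = '"'
      · subst hq
        have hstep : codeValidStep (b, g, e, q, false) '"' = (b - 1, g, e, q, true) := by
          simp [codeValidStep]
        have hout : pvOutside false ('"' :: cs) = pvOutside true cs := by simp [pvOutside]
        rw [hstep, ih, sense_cons_q, hout]
        simp only [Bool.not_false, Prod.mk.injEq, and_true]
        have h1 : pvInQ true = 0 := rfl
        have h2 : pvInQ false = 1 := rfl
        rw [h1, h2]
        ring
      · have hstep : codeValidStep (b, g, e, q, false) c = (b, g, e, q, false) := by
          simp [codeValidStep, hq]
        have hout : pvOutside false (c :: cs) = pvOutside false cs := by simp [pvOutside, hq]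
        rw [hstep, ih, sense_cons_ne false c cs hq, hout]

-- ===== VERDICT (by name: the statement is the Claim_ definition above) =====
theorem code_valid_spec : Claim_equal_code_valid := by
  intro string _
  unfold Spec_code_valid code_valid code_valid_alt
  set cs := PySem.Chars.strip string.toList with hcs
  by_cases hnil : cs = []
  · simp [hnil]
  · simp only [if_neg hnil, ne_eq, hnil, not_false_eq_true, if_pos]
    rw [foldl_step cs 0 0 0 0 true]
    rw [splitOn_eq '"' cs]
    have hout := (join_evens_split cs).1
    have hlen := split_length cs
    by_cases hpar : cs.count '"' % 2 = 0
    · have hsen : pvSense true cs = true := by simp [pvSense, hpar]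
      have hplen : ((pvSplit '"' cs).length % 2 == 0) = false := by
        simp only [hlen]
        simp [Nat.add_mod]
        omega
      rw [hsen, hplen, hout]
      have h1 : pvInQ true = 0 := rfl
      rw [h1]
      simp only [count_singleton, Bool.if_false_right, Bool.if_true_left]
      set o := pvOutside true cs with ho
      by_cases e1 : List.count '(' o = List.count ')' o <;>
        by_cases e2 : List.count '{' o = List.count '}' o <;>
        by_cases e3 : List.count '[' o = List.count ']' o <;>
        simp [e1, e2, e3] <;> simp [dsb, Bool.and_assoc]
    · have hsen : pvSense true cs = false := by simp [pvSense, hpar]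
      have hplen : ((pvSplit '"' cs).length % 2 == 0) = true := by
        simp only [hlen]
        simp [Nat.add_mod]
        omega
      rw [hsen, hplen]
      simp
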